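-- pv_equiv track=rewrite | github.com/UCLA-VAST/RapidStream | python/rapidstream/rtl_gen/top.py | sort_rtl
-- ===== SOURCE A (Python) =====
-- from typing import Dict, List
--
-- def sort_rtl(top: List[str]) -> List[str]:
--   """Move all wire and reg declaration to the front"""
--   decl = []
--   other = []
--
--   for line in top:
--     if 'wire ' in line or 'reg ' in line:
--       decl.append(line)
--     else:
--       other.append(line)
--
--   return decl + other
-- ===== SOURCE B (Python) =====
-- def sort_rtl(top):
--   """Move all wire and reg declaration to the front"""
--   return sorted(top, key=lambda line: 0 if ('wire ' in line or 'reg ' in line) else 1)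
-- ===== Notes on version B (the rewrite author's own statement) =====
-- stated objective: idiomatic
-- what changed: Replaces the two explicit accumulator lists and concatenation with a single stable sort on a binary key (0 for declaration lines, 1 for the rest), which preserves relative order within each group.
import Mathlib
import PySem

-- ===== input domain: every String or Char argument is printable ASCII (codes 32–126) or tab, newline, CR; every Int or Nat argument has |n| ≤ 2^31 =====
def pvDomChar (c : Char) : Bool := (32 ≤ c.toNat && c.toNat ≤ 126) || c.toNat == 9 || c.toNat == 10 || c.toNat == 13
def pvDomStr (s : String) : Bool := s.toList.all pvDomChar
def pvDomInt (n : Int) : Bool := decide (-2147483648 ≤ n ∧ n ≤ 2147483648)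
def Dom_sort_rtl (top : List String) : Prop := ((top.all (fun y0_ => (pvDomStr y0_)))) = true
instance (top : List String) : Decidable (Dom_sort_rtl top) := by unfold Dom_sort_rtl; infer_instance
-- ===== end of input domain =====

-- B replaces A's two accumulator lists with a single stable sort on a binary key (idiomatic).

-- ===== PORT A =====
-- the shared line predicate: 'wire ' in line or 'reg ' in line
def pvIsDecl (line : String) : Bool := PySem.Str.isIn "wire " line || PySem.Str.isIn "reg " line

def sort_rtl (top : List String) : List String :=
  let st := top.foldl (fun (acc : List String × List String) line =>
    if pvIsDecl line then (acc.1 ++ [line], acc.2) else (acc.1, acc.2 ++ [line])) ([], [])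
  st.1 ++ st.2

-- ===== PORT B =====
def pvKey (line : String) : Int := if pvIsDecl line then 0 else 1

def sort_rtl_alt (top : List String) : List String :=
  PySem.List.sorted top pvKey false

-- ===== PRECONDITION & SPEC =====
def Spec_sort_rtl (top : List String) (out : List String) : Prop := out = sort_rtl_alt top
instance (top : List String) (out : List String) : Decidable (Spec_sort_rtl top out) := by unfold Spec_sort_rtl; infer_instance

-- ===== CLAIM (what is proved, stated in full; the proofs are below) =====
def Claim_equal_sort_rtl : Prop := ∀ (top : List String), Dom_sort_rtl top → Spec_sort_rtl top (sort_rtl top)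

-- ===== LEMMAS AND PROOFS =====

-- A's loop computes the two filters
theorem foldl_partition (top : List String) (d o : List String) :
    top.foldl (fun (acc : List String × List String) line =>
      if pvIsDecl line then (acc.1 ++ [line], acc.2) else (acc.1, acc.2 ++ [line])) (d, o)
    = (d ++ top.filter pvIsDecl, o ++ top.filter (fun l => !pvIsDecl l)) := by
  induction top generalizing d o with
  | nil => simp
  | cons x xs ih =>
    by_cases h : pvIsDecl x <;> simp [h, ih]

-- inserting a key-0 element into (key-0 block ++ key-1 block) puts it between the blocks
theorem insertBy_decl (x : String) (F G : List String)
    (hF : ∀ y ∈ F, pvIsDecl y = true) (hG : ∀ y ∈ G, pvIsDecl y = false)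
    (hx : pvIsDecl x = true) :
    PySem.List.insertBy (fun a b => decide (pvKey a < pvKey b)) x (F ++ G) = F ++ x :: G := by
  induction F with
  | nil =>
    cases G with
    | nil => simp [PySem.List.insertBy]
    | cons g t =>
      have hg := hG g (by simp)
      simp [PySem.List.insertBy, pvKey, hx, hg]
  | cons f t ih =>
    have hf := hF f (by simp)
    have hc : (decide (pvKey x < pvKey f)) = false := by simp [pvKey, hx, hf]
    rw [List.cons_append, PySem.List.insertBy, hc]
    simp only [Bool.false_eq_true, if_false]
    rw [ih (fun y hy => hF y (by simp [hy]))]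
    simp

-- the sort's fold maintains "key-0 block ++ key-1 block", each stable
theorem sorted_fold_partition (top : List String) (F G : List String)
    (hF : ∀ y ∈ F, pvIsDecl y = true) (hG : ∀ y ∈ G, pvIsDecl y = false) :
    top.foldl (fun acc x => PySem.List.insertBy (fun a b => decide (pvKey a < pvKey b)) x acc) (F ++ G)
    = (F ++ top.filter pvIsDecl) ++ (G ++ top.filter (fun l => !pvIsDecl l)) := by
  induction top generalizing F G with
  | nil => simp
  | cons x xs ih =>
    by_cases h : pvIsDecl x
    · rw [List.foldl_cons, insertBy_decl x F G hF hG h,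
        show F ++ x :: G = (F ++ [x]) ++ G by simp,
        ih (F ++ [x]) G (by
          intro y hy
          rcases List.mem_append.1 hy with h' | h'
          · exact hF y h'
          · simp at h'; simpa [h'] using h) hG]
      simp [h]
    · rw [List.foldl_cons,
        PySem.List.insertBy_of_forall_not_before _ _ _ (by
          intro y hy
          by_cases hd : pvIsDecl y <;> simp [pvKey, h, hd]),
        show (F ++ G) ++ [x] = F ++ (G ++ [x]) by simp,
        ih F (G ++ [x]) hF (by
          intro y hy
          rcases List.mem_append.1 hy with h' | h'
          · exact hG y h'
          · simp at h'; simpa [h'] using h)]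
      simp [h]

-- ===== VERDICT (by name: the statement is the Claim_ definition above) =====
theorem sort_rtl_spec : Claim_equal_sort_rtl := by
  intro top _
  unfold Spec_sort_rtl sort_rtl sort_rtl_alt
  have h := sorted_fold_partition top [] [] (by simp) (by simp)
  simp only [List.nil_append] at h
  rw [PySem.List.sorted_eq_foldl_insertBy, h]
  simp [foldl_partition top [] []]
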